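-- pv_equiv track=rewrite | github.com/droman42/wb-mqtt-bridge | src/wb_mqtt_bridge/infrastructure/devices/base.py | _get_control_order
-- ===== SOURCE A (Python) =====
-- def _get_control_order(handler_name: str) -> int:
--     """Generate control ordering based on handler name patterns."""
--     handler_lower = handler_name.lower()
--
--     # Power controls first (1-5)
--     if any(x in handler_lower for x in ['power_on', 'turn_on']):
--         return 1
--     elif any(x in handler_lower for x in ['power_off', 'turn_off']):
--         return 2
--     elif any(x in handler_lower for x in ['connect', 'setup']):
--         return 3
--     elif any(x in handler_lower for x in ['disconnect', 'reset', 'restart']):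
--         return 4
--
--     # Audio controls (10-19)
--     elif any(x in handler_lower for x in ['volume', 'vol']):
--         return 10
--     elif any(x in handler_lower for x in ['mute', 'unmute']):
--         return 11
--
--     # Input/source controls (20-24)
--     elif any(x in handler_lower for x in ['input', 'source', 'channel']):
--         return 20
--
--     # Playback controls (25-35)
--     elif 'play' in handler_lower:
--         return 25
--     elif 'pause' in handler_lower:
--         return 26
--     elif 'stop' in handler_lower:
--         return 27
--     elif any(x in handler_lower for x in ['next', 'forward']):
--         return 28
--     elif any(x in handler_lower for x in ['previous', 'rewind']):
--         return 29
--
--     # Navigation controls (40-50)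
--     elif 'home' in handler_lower:
--         return 40
--     elif 'back' in handler_lower:
--         return 41
--     elif 'menu' in handler_lower:
--         return 42
--     elif any(x in handler_lower for x in ['up', 'down', 'left', 'right']):
--         return 43
--     elif any(x in handler_lower for x in ['ok', 'select']):
--         return 44
--
--     # App/application controls (55-59)
--     elif any(x in handler_lower for x in ['app', 'application', 'launch']):
--         return 55
--
--     # Environmental controls (60-70)
--     elif any(x in handler_lower for x in ['temp', 'temperature']):
--         return 60
--     elif any(x in handler_lower for x in ['speed', 'fan']):
--         return 61
--     elif any(x in handler_lower for x in ['brightness', 'contrast']):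
--         return 62
--     elif 'level' in handler_lower:
--         return 63
--
--     # Status/information controls (80-89)
--     elif any(x in handler_lower for x in ['status', 'state', 'current']):
--         return 80
--     elif any(x in handler_lower for x in ['get_', 'list_', 'available']):
--         return 85
--
--     # Generic setters (90-95)
--     elif 'set_' in handler_lower:
--         return 90
--
--     # Everything else (100+)
--     else:
--         return 100
-- ===== SOURCE B (Python) =====
-- _PATTERN_ORDER = {
--     'power_on': 1, 'turn_on': 1,
--     'power_off': 2, 'turn_off': 2,
--     'connect': 3, 'setup': 3,
--     'disconnect': 4, 'reset': 4, 'restart': 4,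
--     'volume': 10, 'vol': 10,
--     'mute': 11, 'unmute': 11,
--     'input': 20, 'source': 20, 'channel': 20,
--     'play': 25,
--     'pause': 26,
--     'stop': 27,
--     'next': 28, 'forward': 28,
--     'previous': 29, 'rewind': 29,
--     'home': 40,
--     'back': 41,
--     'menu': 42,
--     'up': 43, 'down': 43, 'left': 43, 'right': 43,
--     'ok': 44, 'select': 44,
--     'app': 55, 'application': 55, 'launch': 55,
--     'temp': 60, 'temperature': 60,
--     'speed': 61, 'fan': 61,
--     'brightness': 62, 'contrast': 62,
--     'level': 63,
--     'status': 80, 'state': 80, 'current': 80,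
--     'get_': 85, 'list_': 85, 'available': 85,
--     'set_': 90,
-- }
--
-- def _get_control_order(handler_name: str) -> int:
--     # The cascade's priorities strictly increase down the chain, so the first
--     # matching group is simply the matching pattern with the smallest order:
--     # take the minimum over ALL matches instead of short-circuiting.
--     hl = handler_name.lower()
--     return min((o for p, o in _PATTERN_ORDER.items() if p in hl), default=100)
-- ===== Notes on version B (the rewrite author's own statement) =====
-- stated objective: alternative
-- what changed: Replaces the first-match elif cascade by an aggregate: one flat pattern-to-order dict and a minimum over the orders of ALL patterns occurring in the lowercased name (default 100), correct because the cascade's return values strictly increase down the chain.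
import Mathlib
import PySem

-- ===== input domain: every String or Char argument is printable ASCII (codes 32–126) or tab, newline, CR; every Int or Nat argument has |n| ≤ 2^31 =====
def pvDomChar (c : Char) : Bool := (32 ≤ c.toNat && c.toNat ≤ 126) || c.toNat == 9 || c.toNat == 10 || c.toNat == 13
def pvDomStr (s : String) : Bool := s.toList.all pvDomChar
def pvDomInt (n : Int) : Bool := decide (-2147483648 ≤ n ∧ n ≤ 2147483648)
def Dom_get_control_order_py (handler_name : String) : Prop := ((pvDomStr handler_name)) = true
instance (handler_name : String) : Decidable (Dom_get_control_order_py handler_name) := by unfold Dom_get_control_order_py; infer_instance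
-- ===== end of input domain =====

-- B replaces the first-match elif cascade by a minimum over the orders of ALL matching patterns
-- in one flat pattern→order table (valid since the cascade's values strictly increase); objective: alternative.


-- ===== PORT A =====
-- literal transliteration of A's elif cascade over the lowercased name
def get_control_order_py (handler_name : String) : Int :=
  let handler_lower := PySem.Str.lower handler_name
  if (["power_on", "turn_on"] : List String).any (fun x => PySem.Str.isIn x handler_lower) then 1
  else if (["power_off", "turn_off"] : List String).any (fun x => PySem.Str.isIn x handler_lower) then 2
  else if (["connect", "setup"] : List String).any (fun x => PySem.Str.isIn x handler_lower) then 3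
  else if (["disconnect", "reset", "restart"] : List String).any (fun x => PySem.Str.isIn x handler_lower) then 4
  else if (["volume", "vol"] : List String).any (fun x => PySem.Str.isIn x handler_lower) then 10
  else if (["mute", "unmute"] : List String).any (fun x => PySem.Str.isIn x handler_lower) then 11
  else if (["input", "source", "channel"] : List String).any (fun x => PySem.Str.isIn x handler_lower) then 20
  else if PySem.Str.isIn "play" handler_lower then 25
  else if PySem.Str.isIn "pause" handler_lower then 26
  else if PySem.Str.isIn "stop" handler_lower then 27
  else if (["next", "forward"] : List String).any (fun x => PySem.Str.isIn x handler_lower) then 28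
  else if (["previous", "rewind"] : List String).any (fun x => PySem.Str.isIn x handler_lower) then 29
  else if PySem.Str.isIn "home" handler_lower then 40
  else if PySem.Str.isIn "back" handler_lower then 41
  else if PySem.Str.isIn "menu" handler_lower then 42
  else if (["up", "down", "left", "right"] : List String).any (fun x => PySem.Str.isIn x handler_lower) then 43
  else if (["ok", "select"] : List String).any (fun x => PySem.Str.isIn x handler_lower) then 44
  else if (["app", "application", "launch"] : List String).any (fun x => PySem.Str.isIn x handler_lower) then 55
  else if (["temp", "temperature"] : List String).any (fun x => PySem.Str.isIn x handler_lower) then 60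
  else if (["speed", "fan"] : List String).any (fun x => PySem.Str.isIn x handler_lower) then 61
  else if (["brightness", "contrast"] : List String).any (fun x => PySem.Str.isIn x handler_lower) then 62
  else if PySem.Str.isIn "level" handler_lower then 63
  else if (["status", "state", "current"] : List String).any (fun x => PySem.Str.isIn x handler_lower) then 80
  else if (["get_", "list_", "available"] : List String).any (fun x => PySem.Str.isIn x handler_lower) then 85
  else if PySem.Str.isIn "set_" handler_lower then 90
  else 100

-- ===== PORT B =====
-- flat pattern → order dict (insertion order), as in Source B
def patternOrder : List (String × Int) := [
  ("power_on", 1), ("turn_on", 1),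
  ("power_off", 2), ("turn_off", 2),
  ("connect", 3), ("setup", 3),
  ("disconnect", 4), ("reset", 4), ("restart", 4),
  ("volume", 10), ("vol", 10),
  ("mute", 11), ("unmute", 11),
  ("input", 20), ("source", 20), ("channel", 20),
  ("play", 25),
  ("pause", 26),
  ("stop", 27),
  ("next", 28), ("forward", 28),
  ("previous", 29), ("rewind", 29),
  ("home", 40),
  ("back", 41),
  ("menu", 42),
  ("up", 43), ("down", 43), ("left", 43), ("right", 43),
  ("ok", 44), ("select", 44),
  ("app", 55), ("application", 55), ("launch", 55),
  ("temp", 60), ("temperature", 60),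
  ("speed", 61), ("fan", 61),
  ("brightness", 62), ("contrast", 62),
  ("level", 63),
  ("status", 80), ("state", 80), ("current", 80),
  ("get_", 85), ("list_", 85), ("available", 85),
  ("set_", 90)
]

-- min((o for p, o in _PATTERN_ORDER.items() if p in hl), default=100)
def get_control_order_py_alt (handler_name : String) : Int :=
  let hl := PySem.Str.lower handler_name
  (PySem.List.min? (patternOrder.filterMap
      (fun po => if PySem.Str.isIn po.1 hl then some po.2 else none))
    (fun y => y)).getD 100

-- ===== PRECONDITION & SPEC =====
def Spec_get_control_order_py (handler_name : String) (out : Int) : Prop := out = get_control_order_py_alt handler_name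
instance (handler_name : String) (out : Int) : Decidable (Spec_get_control_order_py handler_name out) := by unfold Spec_get_control_order_py; infer_instance

-- ===== CLAIM (what is proved, stated in full; the proofs are below) =====
def Claim_equal_get_control_order_py : Prop := ∀ (handler_name : String), Dom_get_control_order_py handler_name → Spec_get_control_order_py handler_name (get_control_order_py handler_name)

-- ===== LEMMAS AND PROOFS =====

-- first-match recursion over a flat (pattern, order) list
def fmFlat (hl : String) : List (String × Int) → Int
  | [] => 100
  | (p, o) :: rest => if PySem.Str.isIn p hl then o else fmFlat hl rest

theorem foldl_min_eq_self (xs : List Int) (a : Int) (h : ∀ x ∈ xs, a ≤ x) :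
    xs.foldl min a = a := by
  induction xs with
  | nil => rfl
  | cons x t ih =>
      have hax : a ≤ x := h x (List.mem_cons_self ..)
      simp only [List.foldl_cons, min_eq_left hax]
      exact ih (fun y hy => h y (List.mem_cons_of_mem _ hy))

-- on a list whose orders are nondecreasing, min over matches (default 100) = first match
theorem min_matches_eq_fmFlat (hl : String) (L : List (String × Int))
    (hs : L.Pairwise (fun a b => a.2 ≤ b.2)) :
    (PySem.List.min? (L.filterMap
        (fun po => if PySem.Str.isIn po.1 hl then some po.2 else none))
      (fun y => y)).getD 100 = fmFlat hl L := by
  induction L with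
  | nil => rfl
  | cons po rest ih =>
      obtain ⟨p, o⟩ := po
      rcases List.pairwise_cons.mp hs with ⟨hle, htail⟩
      by_cases hin : PySem.Str.isIn p hl = true
      · simp only [List.filterMap_cons, hin, if_pos, fmFlat, PySem.List.min?_id_cons,
          Option.getD_some]
        apply foldl_min_eq_self
        intro x hx
        rcases List.mem_filterMap.mp hx with ⟨⟨q, u⟩, hq, hqe⟩
        by_cases hq2 : PySem.Str.isIn q hl = true
        · simp only [hq2, if_pos] at hqe
          cases hqe
          exact hle (q, x) hq
        · simp only [hq2, Bool.false_eq_true, if_false] at hqe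
          exact absurd hqe (by simp)
      · have : (if PySem.Str.isIn p hl = true then some o else none) = none := by
          rw [if_neg hin]
        rw [List.filterMap_cons, this, fmFlat]
        simp only [hin, Bool.false_eq_true, if_false]
        exact ih htail

-- (if a then v else if b then v else x) = (if a || b then v else x)
theorem if_or (a b : Bool) (v x : Int) :
    (if a then v else if b then v else x) = (if (a || b) then v else x) := by
  cases a <;> cases b <;> simp

theorem cascade_eq_fmFlat (hl : String) : fmFlat hl patternOrder =
    (if (["power_on", "turn_on"] : List String).any (fun x => PySem.Str.isIn x hl) then 1
    else if (["power_off", "turn_off"] : List String).any (fun x => PySem.Str.isIn x hl) then 2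
    else if (["connect", "setup"] : List String).any (fun x => PySem.Str.isIn x hl) then 3
    else if (["disconnect", "reset", "restart"] : List String).any (fun x => PySem.Str.isIn x hl) then 4
    else if (["volume", "vol"] : List String).any (fun x => PySem.Str.isIn x hl) then 10
    else if (["mute", "unmute"] : List String).any (fun x => PySem.Str.isIn x hl) then 11
    else if (["input", "source", "channel"] : List String).any (fun x => PySem.Str.isIn x hl) then 20
    else if PySem.Str.isIn "play" hl then 25
    else if PySem.Str.isIn "pause" hl then 26
    else if PySem.Str.isIn "stop" hl then 27
    else if (["next", "forward"] : List String).any (fun x => PySem.Str.isIn x hl) then 28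
    else if (["previous", "rewind"] : List String).any (fun x => PySem.Str.isIn x hl) then 29
    else if PySem.Str.isIn "home" hl then 40
    else if PySem.Str.isIn "back" hl then 41
    else if PySem.Str.isIn "menu" hl then 42
    else if (["up", "down", "left", "right"] : List String).any (fun x => PySem.Str.isIn x hl) then 43
    else if (["ok", "select"] : List String).any (fun x => PySem.Str.isIn x hl) then 44
    else if (["app", "application", "launch"] : List String).any (fun x => PySem.Str.isIn x hl) then 55
    else if (["temp", "temperature"] : List String).any (fun x => PySem.Str.isIn x hl) then 60
    else if (["speed", "fan"] : List String).any (fun x => PySem.Str.isIn x hl) then 61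
    else if (["brightness", "contrast"] : List String).any (fun x => PySem.Str.isIn x hl) then 62
    else if PySem.Str.isIn "level" hl then 63
    else if (["status", "state", "current"] : List String).any (fun x => PySem.Str.isIn x hl) then 80
    else if (["get_", "list_", "available"] : List String).any (fun x => PySem.Str.isIn x hl) then 85
    else if PySem.Str.isIn "set_" hl then 90
    else 100) := by
  simp only [patternOrder, fmFlat, List.any_cons, List.any_nil, Bool.or_false, if_or]

theorem pairwise_patternOrder : patternOrder.Pairwise (fun a b => a.2 ≤ b.2) := by
  simp only [patternOrder]
  decide

-- ===== VERDICT (by name: the statement is the Claim_ definition above) =====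
theorem get_control_order_py_spec : Claim_equal_get_control_order_py := by
  intro handler_name _
  unfold Spec_get_control_order_py get_control_order_py_alt get_control_order_py
  rw [min_matches_eq_fmFlat _ _ pairwise_patternOrder, cascade_eq_fmFlat]
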